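-- pv_equiv track=rewrite | github.com/cirosantilli/project-euler-solutions | solvers/802.py | _build_floor_div_queries
-- ===== SOURCE A (Python) =====
-- def _build_floor_div_queries(n: int) -> list[int]:
--     """Return sorted distinct values of floor(n / k) for k=1..n."""
--     qs = set()
--     k = 1
--     while k <= n:
--         q = n // k
--         qs.add(q)
--         k = n // q + 1
--     return sorted(qs)
-- ===== SOURCE B (Python) =====
-- def _build_floor_div_queries(n: int) -> list[int]:
--     """Return sorted distinct values of floor(n / k) for k=1..n."""
--     if n < 1:
--         return []
--     s = 1
--     while (s + 1) * (s + 1) <= n: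
--         s += 1
--     small = list(range(1, s + 1))
--     large = [n // i for i in range(s, 0, -1) if n // i > s]
--     return small + large
-- ===== Notes on version B (the rewrite author's own statement) =====
-- stated objective: alternative
-- what changed: Instead of A's set-then-sort over an adaptive quotient-jumping while-loop, B computes s = isqrt(n) and constructs the sorted output directly as the concatenation of the small quotients 1..s with the large quotients n//i (i = s..1 descending, filtered to exceed s), so no set and no sort are used.
import Mathlib
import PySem

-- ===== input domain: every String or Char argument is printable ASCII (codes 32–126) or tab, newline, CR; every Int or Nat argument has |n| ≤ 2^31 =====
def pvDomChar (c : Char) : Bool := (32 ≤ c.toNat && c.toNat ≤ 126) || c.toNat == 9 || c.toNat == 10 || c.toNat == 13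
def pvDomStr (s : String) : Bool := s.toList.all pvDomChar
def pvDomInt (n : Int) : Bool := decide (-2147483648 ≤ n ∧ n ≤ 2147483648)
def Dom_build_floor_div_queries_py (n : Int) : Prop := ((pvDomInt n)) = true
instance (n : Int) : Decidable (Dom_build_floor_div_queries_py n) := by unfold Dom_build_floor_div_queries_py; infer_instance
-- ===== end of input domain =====

-- B replaces A's set-collection with a sort by a direct construction of the sorted output:
-- s = isqrt(n), then [1..s] ++ ascending large quotients n//i (i = s..1, filtered to exceed s).

-- ===== PORT A =====
-- A's while loop: k jumps to n//q + 1 each pass.  k strictly increases while k ≤ n, so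
-- n.toNat + 1 units of fuel always suffice (proved in pvLoopA_mem below).
def pvLoopA (n : Int) : Nat → Int → PySem.Set Int → PySem.Set Int
  | 0, _, qs => qs
  | fuel + 1, k, qs =>
    if k ≤ n then
      let q := PySem.Int.floordiv n k
      pvLoopA n fuel (PySem.Int.floordiv n q + 1) (PySem.Set.add qs q)
    else qs

def build_floor_div_queries_py (n : Int) : List Int :=
  PySem.List.sorted (pvLoopA n (n.toNat + 1) 1 PySem.Set.empty) (fun x => x) false

-- ===== PORT B =====
-- B's isqrt loop: s = 1; while (s+1)*(s+1) <= n: s += 1.  s rises by 1 each pass and stays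
-- below n, so n.toNat units of fuel suffice (proved in pvIsqrtLoop_spec below).
def pvIsqrtLoop (n : Int) : Nat → Int → Int
  | 0, s => s
  | fuel + 1, s => if (s + 1) * (s + 1) ≤ n then pvIsqrtLoop n fuel (s + 1) else s

def build_floor_div_queries_py_alt (n : Int) : List Int :=
  if n < 1 then []
  else
    let s := pvIsqrtLoop n n.toNat 1
    let small := PySem.List.pyRange 1 (s + 1) 1
    let large := ((PySem.List.pyRange s 0 (-1)).filter
        (fun i => decide (s < PySem.Int.floordiv n i))).map (fun i => PySem.Int.floordiv n i)
    small ++ large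

-- ===== PRECONDITION & SPEC =====
def Spec_build_floor_div_queries_py (n : Int) (out : List Int) : Prop := out = build_floor_div_queries_py_alt n
instance (n : Int) (out : List Int) : Decidable (Spec_build_floor_div_queries_py n out) := by unfold Spec_build_floor_div_queries_py; infer_instance

-- ===== CLAIM =====
def Claim_equal_build_floor_div_queries_py : Prop := ∀ (n : Int), Dom_build_floor_div_queries_py n → Spec_build_floor_div_queries_py n (build_floor_div_queries_py n)

-- ===== LEMMAS AND PROOFS =====

-- Basic bracket facts about q = n // k for 0 < k ≤ n.
theorem pv_floordiv_pos {n k : Int} (hk : 0 < k) (hkn : k ≤ n) :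
    1 ≤ PySem.Int.floordiv n k := by
  rw [PySem.Int.le_floordiv_iff_mul_le hk]; omega

theorem pv_floordiv_mul_le {n k : Int} (hk : 0 < k) :
    PySem.Int.floordiv n k * k ≤ n :=
  (PySem.Int.le_floordiv_iff_mul_le hk).mp (le_refl _)

theorem pv_lt_floordiv_add_one_mul {n k : Int} (hk : 0 < k) :
    n < (PySem.Int.floordiv n k + 1) * k :=
  (PySem.Int.floordiv_lt_iff_lt_mul hk).mp (by omega)

theorem pv_floordiv_nonneg {n k : Int} (hk : 0 < k) (hn : 0 ≤ n) :
    0 ≤ PySem.Int.floordiv n k := by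
  rw [PySem.Int.le_floordiv_iff_mul_le hk]; omega

theorem pv_floordiv_le_self {n k : Int} (hk : 0 < k) (hn : 0 ≤ n) :
    PySem.Int.floordiv n k ≤ n := by
  have h0 : 0 ≤ PySem.Int.floordiv n k := pv_floordiv_nonneg hk hn
  have h := pv_floordiv_mul_le (n := n) hk
  nlinarith

-- For 0 < k ≤ j ≤ n // (n // k) (with k ≤ n), the quotient is constant: n // j = n // k.
theorem pv_floordiv_const {n k j : Int} (hk : 0 < k) (hkn : k ≤ n)
    (hkj : k ≤ j) (hj : j ≤ PySem.Int.floordiv n (PySem.Int.floordiv n k)) :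
    PySem.Int.floordiv n j = PySem.Int.floordiv n k := by
  set q := PySem.Int.floordiv n k with hq
  have hq1 : 1 ≤ q := pv_floordiv_pos hk hkn
  have hj0 : 0 < j := by omega
  have hjq : j * q ≤ n := (PySem.Int.le_floordiv_iff_mul_le (by omega : (0:Int) < q)).mp hj
  have h1 : q ≤ PySem.Int.floordiv n j := by
    rw [PySem.Int.le_floordiv_iff_mul_le hj0, mul_comm]; exact hjq
  have h2 : PySem.Int.floordiv n j < q + 1 := by
    rw [PySem.Int.floordiv_lt_iff_lt_mul hj0]
    have hnk : n < (q + 1) * k := pv_lt_floordiv_add_one_mul hk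
    nlinarith
  omega

-- A's next index n // (n // k) + 1 strictly increases.
theorem pv_next_ge {n k : Int} (hk : 0 < k) (hkn : k ≤ n) :
    k ≤ PySem.Int.floordiv n (PySem.Int.floordiv n k) := by
  have hq1 : 1 ≤ PySem.Int.floordiv n k := pv_floordiv_pos hk hkn
  rw [PySem.Int.le_floordiv_iff_mul_le (by omega : (0:Int) < PySem.Int.floordiv n k), mul_comm]
  exact pv_floordiv_mul_le hk

-- Membership invariant of A's loop.
theorem pvLoopA_mem (n : Int) (hn : 1 ≤ n) :
    ∀ (fuel : Nat) (k : Int) (qs : PySem.Set Int), 1 ≤ k → (n + 1 - k).toNat < fuel →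
      ∀ v, v ∈ pvLoopA n fuel k qs ↔
        v ∈ qs ∨ ∃ j : Int, k ≤ j ∧ j ≤ n ∧ PySem.Int.floordiv n j = v := by
  intro fuel
  induction fuel with
  | zero => intro k qs _ hf; omega
  | succ fuel ih =>
    intro k qs hk hf v
    by_cases hkn : k ≤ n
    · have hk0 : (0:Int) < k := by omega
      have hq1 : 1 ≤ PySem.Int.floordiv n k := pv_floordiv_pos hk0 hkn
      have hnext : k ≤ PySem.Int.floordiv n (PySem.Int.floordiv n k) := pv_next_ge hk0 hkn
      have hle : PySem.Int.floordiv n (PySem.Int.floordiv n k) ≤ n :=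
        pv_floordiv_le_self (by omega) (by omega)
      simp only [pvLoopA, if_pos hkn]
      rw [ih _ _ (by omega) (by omega)]
      rw [PySem.Set.mem_add]
      constructor
      · rintro ((h | h) | ⟨j, hj1, hj2, hj3⟩)
        · exact Or.inl h
        · exact Or.inr ⟨k, le_refl k, hkn, h.symm⟩
        · exact Or.inr ⟨j, by omega, hj2, hj3⟩
      · rintro (h | ⟨j, hj1, hj2, hj3⟩)
        · exact Or.inl (Or.inl h)
        · by_cases hjbig : PySem.Int.floordiv n (PySem.Int.floordiv n k) + 1 ≤ j
          · exact Or.inr ⟨j, hjbig, hj2, hj3⟩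
          · refine Or.inl (Or.inr ?_)
            rw [← hj3, pv_floordiv_const hk0 hkn hj1 (by omega)]
    · simp only [pvLoopA, if_neg hkn]
      constructor
      · exact fun h => Or.inl h
      · rintro (h | ⟨j, hj1, hj2, _⟩)
        · exact h
        · omega

-- The loop preserves Nodup (it builds a genuine PySem set).
theorem pvLoopA_nodup (n : Int) :
    ∀ (fuel : Nat) (k : Int) (qs : PySem.Set Int), qs.Nodup → (pvLoopA n fuel k qs).Nodup := by
  intro fuel
  induction fuel with
  | zero => intro k qs h; exact h
  | succ fuel ih =>
    intro k qs h
    by_cases hkn : k ≤ n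
    · simp only [pvLoopA, if_pos hkn]; exact ih _ _ (PySem.Set.nodup_add _ _ h)
    · simp only [pvLoopA, if_neg hkn]; exact h

-- B's isqrt loop computes the integer square root.
theorem pvIsqrtLoop_spec (n : Int) :
    ∀ (fuel : Nat) (s : Int), 1 ≤ s → s * s ≤ n → (n - s).toNat < fuel →
      s ≤ pvIsqrtLoop n fuel s ∧ pvIsqrtLoop n fuel s * pvIsqrtLoop n fuel s ≤ n ∧
        n < (pvIsqrtLoop n fuel s + 1) * (pvIsqrtLoop n fuel s + 1) := by
  intro fuel
  induction fuel with
  | zero => intro s _ _ hf; omega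
  | succ fuel ih =>
    intro s hs hsq hf
    by_cases hc : (s + 1) * (s + 1) ≤ n
    · simp only [pvIsqrtLoop, if_pos hc]
      have hle : s + 1 ≤ n := by nlinarith
      have := ih (s + 1) (by omega) hc (by omega)
      exact ⟨by omega, this.2⟩
    · simp only [pvIsqrtLoop, if_neg hc]
      exact ⟨le_refl s, hsq, by omega⟩

-- The value set of the quotients, in √n form (both directions).
theorem pv_sets_iff (n : Int) (hn : 1 ≤ n) (v : Int) :
    (∃ j : Int, 1 ≤ j ∧ j ≤ n ∧ PySem.Int.floordiv n j = v) ↔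
    (∃ j : Int, 1 ≤ j ∧ j * j ≤ n ∧ (v = j ∨ v = PySem.Int.floordiv n j)) := by
  constructor
  · rintro ⟨j, hj1, hj2, hv⟩
    by_cases hsq : j * j ≤ n
    · exact ⟨j, hj1, hsq, Or.inr hv.symm⟩
    · have hsq' : n < j * j := by omega
      have hj0 : (0:Int) < j := by omega
      have hq1 : 1 ≤ PySem.Int.floordiv n j := pv_floordiv_pos hj0 hj2
      have hqj : PySem.Int.floordiv n j * j ≤ n := pv_floordiv_mul_le hj0
      have hqlt : PySem.Int.floordiv n j < j := by
        rw [PySem.Int.floordiv_lt_iff_lt_mul hj0]; exact hsq'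
      refine ⟨PySem.Int.floordiv n j, hq1, by nlinarith, Or.inl hv.symm⟩
  · rintro ⟨j, hj1, hj2, hv⟩
    have hj0 : (0:Int) < j := by omega
    have hjn : j ≤ n := by nlinarith
    rcases hv with hv | hv
    · have hq1 : 1 ≤ PySem.Int.floordiv n j := pv_floordiv_pos hj0 hjn
      have hqj : PySem.Int.floordiv n j * j ≤ n := pv_floordiv_mul_le hj0
      have hjq : j ≤ PySem.Int.floordiv n j := by
        rw [PySem.Int.le_floordiv_iff_mul_le hj0]; exact hj2
      refine ⟨PySem.Int.floordiv n j, hq1, pv_floordiv_le_self hj0 (by omega), ?_⟩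
      have h1 : j ≤ PySem.Int.floordiv n (PySem.Int.floordiv n j) := by
        rw [PySem.Int.le_floordiv_iff_mul_le (by omega : (0:Int) < PySem.Int.floordiv n j),
          mul_comm]
        exact hqj
      have h2 : PySem.Int.floordiv n (PySem.Int.floordiv n j) < j + 1 := by
        rw [PySem.Int.floordiv_lt_iff_lt_mul (by omega : (0:Int) < PySem.Int.floordiv n j)]
        have hnk : n < (PySem.Int.floordiv n j + 1) * j := pv_lt_floordiv_add_one_mul hj0
        nlinarith
      omega
    · exact ⟨j, hj1, hjn, hv.symm⟩

-- Antitone step and strict growth of the large quotients (j < i, quotient of i above s ≥ j).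
theorem pv_q_strict {n s i j : Int} (hj : 1 ≤ j) (hji : j < i) (_hin : i ≤ n)
    (hjs : j ≤ s) (hqi : s < PySem.Int.floordiv n i) :
    PySem.Int.floordiv n i < PySem.Int.floordiv n j := by
  have hi0 : (0:Int) < i := by omega
  have hj0 : (0:Int) < j := by omega
  have ha : PySem.Int.floordiv n i * i ≤ n := pv_floordiv_mul_le hi0
  have hq0 : 0 ≤ PySem.Int.floordiv n i := by omega
  have hle : PySem.Int.floordiv n i ≤ PySem.Int.floordiv n j := by
    rw [PySem.Int.le_floordiv_iff_mul_le hj0]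
    nlinarith
  rcases lt_or_eq_of_le hle with h | h
  · exact h
  · exfalso
    have hb : n < (PySem.Int.floordiv n j + 1) * j := pv_lt_floordiv_add_one_mul hj0
    rw [← h] at hb
    have hsmall : PySem.Int.floordiv n i * (i - j) < j := by nlinarith
    have hbig : PySem.Int.floordiv n i ≤ PySem.Int.floordiv n i * (i - j) :=
      le_mul_of_one_le_right hq0 (by omega)
    omega

-- ===== VERDICT =====
theorem build_floor_div_queries_py_spec : Claim_equal_build_floor_div_queries_py := by
  intro n _
  unfold Spec_build_floor_div_queries_py build_floor_div_queries_py build_floor_div_queries_py_alt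
  by_cases hn : n < 1
  · have h1 : n.toNat = 0 := by omega
    rw [if_pos hn, h1]
    simp only [pvLoopA, if_neg (by omega : ¬ (1:Int) ≤ n)]
    rw [PySem.List.sorted_eq_nil_iff]
    rfl
  · rw [not_lt] at hn
    rw [if_neg (by omega)]
    have hs := pvIsqrtLoop_spec n n.toNat 1 (le_refl 1) (by omega) (by omega)
    set s := pvIsqrtLoop n n.toNat 1 with hsdef
    obtain ⟨hs1, hs2, hs3⟩ := hs
    have hsn : s ≤ n := by nlinarith
    -- pairwise < of the constructed list
    have hsmall_pw : (PySem.List.pyRange 1 (s + 1) 1).Pairwise (· < ·) :=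
      PySem.List.pairwise_lt_pyRange_one 1 (s + 1)
    have hrange_pw : (PySem.List.pyRange s 0 (-1)).Pairwise (· > ·) := by
      rw [PySem.List.pyRange_neg_one_eq_reverse, List.pairwise_reverse]
      exact PySem.List.pairwise_lt_pyRange_one 1 (s + 1)
    have hlarge_pw : (((PySem.List.pyRange s 0 (-1)).filter
        (fun i => decide (s < PySem.Int.floordiv n i))).map
        (fun i => PySem.Int.floordiv n i)).Pairwise (· < ·) := by
      rw [List.pairwise_map, List.pairwise_filter]
      refine hrange_pw.imp_of_mem ?_
      intro a b ha hb hab hpa hpb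
      rw [PySem.List.mem_pyRange_neg_one] at ha hb
      exact pv_q_strict (s := s) (by omega) hab (by omega) (by omega) (by simpa using hpa)
    have hpw : ((PySem.List.pyRange 1 (s + 1) 1) ++ ((PySem.List.pyRange s 0 (-1)).filter
        (fun i => decide (s < PySem.Int.floordiv n i))).map
        (fun i => PySem.Int.floordiv n i)).Pairwise (· < ·) := by
      rw [List.pairwise_append]
      refine ⟨hsmall_pw, hlarge_pw, ?_⟩
      intro a ha b hb
      rw [PySem.List.mem_pyRange_one] at ha
      rw [List.mem_map] at hb
      obtain ⟨i, hi, rfl⟩ := hb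
      rw [List.mem_filter] at hi
      have := hi.2
      simp only [decide_eq_true_eq] at this
      omega
    -- membership of the constructed list = membership of A's set
    have hmem : ∀ v, v ∈ (PySem.List.pyRange 1 (s + 1) 1) ++ ((PySem.List.pyRange s 0 (-1)).filter
        (fun i => decide (s < PySem.Int.floordiv n i))).map
        (fun i => PySem.Int.floordiv n i) ↔ v ∈ pvLoopA n (n.toNat + 1) 1 PySem.Set.empty := by
      intro v
      rw [pvLoopA_mem n hn _ 1 _ (le_refl 1) (by omega) v]
      simp only [PySem.Set.empty, List.not_mem_nil, false_or]
      rw [pv_sets_iff n hn v]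
      rw [List.mem_append, PySem.List.mem_pyRange_one, List.mem_map]
      constructor
      · rintro (⟨h1, h2⟩ | ⟨i, hi, rfl⟩)
        · exact ⟨v, h1, by nlinarith, Or.inl rfl⟩
        · rw [List.mem_filter, PySem.List.mem_pyRange_neg_one] at hi
          exact ⟨i, by omega, by nlinarith [hi.1.1, hi.1.2], Or.inr rfl⟩
      · rintro ⟨j, hj1, hj2, hv⟩
        have hjs : j ≤ s := by nlinarith
        have hjn : j ≤ n := by omega
        rcases hv with rfl | rfl
        · exact Or.inl ⟨hj1, by omega⟩
        · by_cases hbig : s < PySem.Int.floordiv n j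
          · refine Or.inr ⟨j, ?_, rfl⟩
            rw [List.mem_filter, PySem.List.mem_pyRange_neg_one]
            exact ⟨⟨by omega, hjs⟩, by simpa using hbig⟩
          · refine Or.inl ⟨pv_floordiv_pos (by omega) hjn, by omega⟩
    -- conclude: the constructed list is the strictly increasing rearrangement of A's set
    refine PySem.List.sorted_eq_of_perm_of_pairwise_lt _ _ _ ?_ hpw
    rw [List.perm_ext_iff_of_nodup (hpw.imp ne_of_lt)
      (pvLoopA_nodup n (n.toNat + 1) 1 PySem.Set.empty (by simp [PySem.Set.empty]))]
    exact hmem
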